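-- pv_equiv track=rewrite | github.com/Jyotsna0303/DSA | checkifsubsequence.py | subsequence
-- ===== SOURCE A (Python) =====
-- def subsequence(str1, str2):
--     if len(str1) < len(str2):
--         return False
--     len1= len(str1)
--     len2= len(str2)
--     i ,j= 0,0
--     while i < len1 and j < len2 :
--         if str1[i] == str2[j]:
--             j +=1
--         i += 1
--     return j == len2 # if true that means subsequence exists otherwise not
-- ===== SOURCE B (Python) =====
-- def subsequence(str1, str2):
--     # Inverted index: for each character of str1, the sorted list of its positions.
--     index = {}
--     for i, c in enumerate(str1):
--         index.setdefault(c, []).append(i)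
--     # Greedily match str2 by binary-searching the next usable position.
--     need = 0
--     for c in str2:
--         ps = index.get(c, [])
--         lo, hi = 0, len(ps)
--         while lo < hi:
--             mid = (lo + hi) // 2
--             if ps[mid] < need:
--                 lo = mid + 1
--             else:
--                 hi = mid
--         if lo == len(ps):
--             return False
--         need = ps[lo] + 1
--     return True
-- ===== Notes on version B (the rewrite author's own statement) =====
-- stated objective: alternative
-- what changed: Replaced the single two-pointer scan with a different data structure: B builds an inverted index mapping each character of str1 to its sorted position list, then matches str2 greedily by binary-searching each character's next usable position instead of scanning str1.
import Mathlib
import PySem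

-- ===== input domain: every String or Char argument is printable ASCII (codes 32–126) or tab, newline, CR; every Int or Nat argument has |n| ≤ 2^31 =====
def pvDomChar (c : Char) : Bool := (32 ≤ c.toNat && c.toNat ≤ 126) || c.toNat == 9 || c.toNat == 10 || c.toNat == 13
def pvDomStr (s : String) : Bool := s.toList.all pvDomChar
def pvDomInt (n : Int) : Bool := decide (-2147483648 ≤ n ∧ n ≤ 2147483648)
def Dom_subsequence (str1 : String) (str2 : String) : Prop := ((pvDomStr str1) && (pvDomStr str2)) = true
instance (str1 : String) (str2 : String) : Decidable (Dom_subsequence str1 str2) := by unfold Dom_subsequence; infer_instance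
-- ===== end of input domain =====

-- B replaces A's single left-to-right two-pointer scan with a different data structure:
-- an inverted index (char -> increasing positions in str1) queried by binary search for
-- each character of str2; same return value everywhere ("alternative" objective).

-- ===== PORT A =====
-- A's while loop over (i, j): state kept as the two remaining suffixes str1[i:], str2[j:];
-- it returns str2's remaining suffix at loop exit (j == len2 ↔ that suffix is empty)
def subseqWhileA : List Char → List Char → List Char
  | [], r => r
  | _ :: _, [] => []
  | c :: cs, d :: ds => if c = d then subseqWhileA cs ds else subseqWhileA cs (d :: ds)

def subsequence (str1 : String) (str2 : String) : Bool :=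
  if PySem.Str.len str1 < PySem.Str.len str2 then false
  else decide (subseqWhileA str1.toList str2.toList = [])

-- ===== PORT B =====
-- index.setdefault(c, []).append(i) over enumerate(str1): d[c] = d.get(c, []) ++ [i]
def buildIdx (l : List Char) : PySem.Dict Char (List Int) :=
  (PySem.List.enumerate l).foldl (fun d ic => d.modify ic.2 [] (· ++ [ic.1])) PySem.Dict.empty

-- the `while lo < hi` binary-search loop; fuel = (hi - lo).toNat at the call site makes the
-- recursion structural (always sufficient, see bsearch_spec); ps[mid] read via pyGetD with an
-- arbitrary default — mid is always in range there (lo ≤ mid < hi ≤ len ps)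
def bsearch (ps : List Int) (need : Int) : Nat → Int → Int → Int
  | 0, lo, _ => lo
  | fuel + 1, lo, hi =>
      if lo < hi then
        let mid := PySem.Int.floordiv (lo + hi) 2
        if PySem.List.pyGetD ps mid 0 < need then bsearch ps need fuel (mid + 1) hi
        else bsearch ps need fuel lo mid
      else lo

-- the `for c in str2` loop, threading `need`
def goB (idx : PySem.Dict Char (List Int)) : List Char → Int → Bool
  | [], _ => true
  | c :: cs, need =>
      let ps := idx.getD c []
      let lo := bsearch ps need ps.length 0 (PySem.List.len ps)
      if lo = PySem.List.len ps then false
      else goB idx cs (PySem.List.pyGetD ps lo 0 + 1)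

def subsequence_alt (str1 : String) (str2 : String) : Bool :=
  goB (buildIdx str1.toList) str2.toList 0

-- ===== PRECONDITION & SPEC =====
def Spec_subsequence (str1 : String) (str2 : String) (out : Bool) : Prop := out = subsequence_alt str1 str2
instance (str1 : String) (str2 : String) (out : Bool) : Decidable (Spec_subsequence str1 str2 out) := by unfold Spec_subsequence; infer_instance

-- ===== CLAIM (what is proved, stated in full; the proofs are below) =====
def Claim_equal_subsequence : Prop := ∀ (str1 : String) (str2 : String), Dom_subsequence str1 str2 → Spec_subsequence str1 str2 (subsequence str1 str2)

-- ===== LEMMAS AND PROOFS =====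

-- the positions of c in l, in increasing order — what B's index stores under key c
def posList (l : List Char) (c : Char) : List Int :=
  (((PySem.List.enumerate l).filter (fun p => p.2 == c)).map (fun p => p.1))

theorem buildIdx_getD (l : List Char) (c : Char) :
    (buildIdx l).getD c [] = posList l c := by
  have h := PySem.Dict.getD_foldl_modify_append ((PySem.List.enumerate l).map Prod.swap) PySem.Dict.empty c
  rw [List.foldl_map] at h
  unfold buildIdx posList
  simpa [Prod.swap, List.filter_map, List.map_map, Function.comp] using h

theorem mem_posList {l : List Char} {c : Char} {x : Int} :
    x ∈ posList l c ↔ ∃ (k : Nat) (h : k < l.length), l[k] = c ∧ x = (k : Int) := by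
  simp only [posList, List.mem_map, List.mem_filter, PySem.List.mem_enumerate_iff]
  constructor
  · rintro ⟨⟨i, ch⟩, ⟨⟨k, hk, hpq⟩, hc⟩, rfl⟩
    cases hpq
    simp only [beq_iff_eq] at hc
    exact ⟨k, hk, hc, by omega⟩
  · rintro ⟨k, hk, hc, rfl⟩
    exact ⟨((k : Int), l[k]), ⟨⟨k, hk, by simp⟩, by simp [hc]⟩, rfl⟩

theorem posList_sorted (l : List Char) (c : Char) : (posList l c).Pairwise (· < ·) := by
  unfold posList
  apply List.Pairwise.map
  · intro a b h; exact h
  · exact (PySem.List.pairwise_lt_enumerate l 0).sublist List.filter_sublist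

theorem subseqWhileA_greedy (l : List Char) (c : Char) (cs : List Char) :
    subseqWhileA l (c :: cs) =
      (match l.findIdx? (fun d => d == c) with
       | none => c :: cs
       | some k => subseqWhileA (l.drop (k + 1)) cs) := by
  induction l with
  | nil => rfl
  | cons b bs ih =>
      by_cases h : b = c
      · subst h
        simp [subseqWhileA, List.findIdx?_cons]
      · have hbc : (b == c) = false := by simp [h]
        simp only [subseqWhileA, if_neg h, ih, List.findIdx?_cons, hbc]
        cases hfi : List.findIdx? (fun d => d == c) bs <;> simp

theorem subseqWhileA_nil_right (l : List Char) : subseqWhileA l [] = [] := by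
  cases l <;> rfl

-- the residue of A's loop is at least len2 - len1 long
theorem subseqWhileA_length (l1 l2 : List Char) :
    l2.length ≤ (subseqWhileA l1 l2).length + l1.length := by
  induction l1 generalizing l2 with
  | nil => simp [subseqWhileA]
  | cons c cs ih =>
      cases l2 with
      | nil => simp
      | cons d ds =>
          by_cases h : c = d
          · subst h
            have := ih ds
            simp only [subseqWhileA, if_true, List.length_cons]
            omega
          · have := ih (d :: ds)
            simp only [subseqWhileA, if_neg h, List.length_cons] at *
            omega

theorem pairwise_le_getElem? {ps : List Int} (hs : ps.Pairwise (· ≤ ·)) {i j : Nat} (hij : i ≤ j)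
    {x y : Int} (hx : ps[i]? = some x) (hy : ps[j]? = some y) : x ≤ y := by
  rw [List.getElem?_eq_some_iff] at hx hy
  obtain ⟨hi, rfl⟩ := hx
  obtain ⟨hj, rfl⟩ := hy
  rcases Nat.lt_or_ge i j with h | h
  · exact (List.pairwise_iff_getElem.mp hs) i j hi hj h
  · have : i = j := by omega
    subst this; rfl

-- binary-search postcondition: the result r splits ps into the part < need and the part ≥ need
theorem bsearch_spec (ps : List Int) (need : Int) (hs : ps.Pairwise (· ≤ ·)) :
    ∀ (fuel : Nat) (lo hi : Int), 0 ≤ lo → lo ≤ hi → hi ≤ ps.length →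
    (hi - lo).toNat ≤ fuel →
    (∀ (i : Nat), (i : Int) < lo → ∀ x, ps[i]? = some x → x < need) →
    (∀ (i : Nat), hi ≤ (i : Int) → ∀ x, ps[i]? = some x → need ≤ x) →
    0 ≤ bsearch ps need fuel lo hi ∧ bsearch ps need fuel lo hi ≤ ps.length ∧
      (∀ (i : Nat), (i : Int) < bsearch ps need fuel lo hi → ∀ x, ps[i]? = some x → x < need) ∧
      (∀ (i : Nat), bsearch ps need fuel lo hi ≤ (i : Int) → ∀ x, ps[i]? = some x → need ≤ x) := by
  intro fuel
  induction fuel with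
  | zero =>
      intro lo hi h0 hlh hhl hf hlo hhi
      have : hi = lo := by omega
      subst this
      simp only [bsearch]
      exact ⟨h0, by omega, hlo, hhi⟩
  | succ fuel ih =>
      intro lo hi h0 hlh hhl hf hlo hhi
      by_cases hlt : lo < hi
      · have hmidlo : lo ≤ PySem.Int.floordiv (lo + hi) 2 := (PySem.Int.floordiv_two_mid_bounds hlh).1
        have hmidhi : PySem.Int.floordiv (lo + hi) 2 < hi := by
          rw [PySem.Int.floordiv_lt_iff_lt_mul (by omega)]
          omega
        set mid := PySem.Int.floordiv (lo + hi) 2 with hmid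
        have hmr : mid.toNat < ps.length := by omega
        have hget : ps[mid.toNat]? = some ps[mid.toNat] := List.getElem?_eq_some_iff.mpr ⟨hmr, rfl⟩
        have hpg : PySem.List.pyGetD ps mid 0 = ps[mid.toNat] :=
          PySem.List.pyGetD_eq_getElem ps 0 (by omega) (by omega)
        rw [bsearch]
        simp only [if_pos hlt, ← hmid]

        by_cases hv : PySem.List.pyGetD ps mid 0 < need
        · rw [if_pos hv]
          refine ih (mid + 1) hi (by omega) (by omega) hhl (by omega) ?_ hhi
          intro i hilt x hx
          have hle : x ≤ ps[mid.toNat] := pairwise_le_getElem? hs (by omega) hx hget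
          rw [hpg] at hv
          omega
        · rw [if_neg hv]
          refine ih lo mid h0 (by omega) (by omega) (by omega) hlo ?_
          intro i hile x hx
          have : ps[mid.toNat] ≤ x := by
            refine pairwise_le_getElem? hs ?_ hget hx
            omega
          rw [hpg] at hv
          omega
      · rw [bsearch]
        simp only [if_neg hlt]
        exact ⟨h0, by omega, hlo, fun i hi' x hx => hhi i (by omega) x hx⟩

-- main invariant: B's loop from `need` decides emptiness of A's residue on l.drop need
set_option maxRecDepth 8192 in
theorem goB_eq (l : List Char) : ∀ (cs : List Char) (n : Int), 0 ≤ n →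
    goB (buildIdx l) cs n = decide (subseqWhileA (l.drop n.toNat) cs = []) := by
  intro cs
  induction cs with
  | nil => intro n hn; simp [goB, subseqWhileA_nil_right]
  | cons c cs ih =>
      intro n hn
      rw [goB, buildIdx_getD]
      have hsorted := posList_sorted l c
      have hs' : (posList l c).Pairwise (· ≤ ·) := hsorted.imp le_of_lt
      set ps := posList l c with hps
      have hlen : PySem.List.len ps = (ps.length : Int) := PySem.List.len_eq ps
      obtain ⟨hr0, hrlen, hbelow, habove⟩ :=
        bsearch_spec ps n hs' ps.length 0 (PySem.List.len ps)
          le_rfl (by omega) (by rw [hlen]) (by omega)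
          (fun i hi x hx => absurd hi (by omega))
          (fun i hi x hx => by
            rw [List.getElem?_eq_none (by omega)] at hx; cases hx)
      set r := bsearch ps n ps.length 0 (PySem.List.len ps) with hr
      set m := n.toNat with hm
      by_cases hcase : r = PySem.List.len ps
      · rw [if_pos hcase]
        rw [subseqWhileA_greedy]
        cases hfi : (l.drop m).findIdx? (fun d => d == c) with
        | none => simp
        | some k =>
            exfalso
            rw [List.findIdx?_eq_some_iff_getElem] at hfi
            obtain ⟨hk, hpk, _⟩ := hfi
            have hlend : (l.drop m).length = l.length - m := List.length_drop
            have hk' : m + k < l.length := by omega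
            have hgc : l[m + k] = c := by
              have h1 : (l.drop m)[k]? = l[m + k]? := List.getElem?_drop
              rw [List.getElem?_eq_getElem hk, List.getElem?_eq_getElem hk'] at h1
              have h2 : (l.drop m)[k] = l[m + k] := by exact_mod_cast Option.some.inj h1
              rw [← h2]; exact beq_iff_eq.mp hpk
            have hmem : ((m + k : Nat) : Int) ∈ ps :=
              mem_posList.mpr ⟨m + k, hk', hgc, rfl⟩
            obtain ⟨j, hj, hjx⟩ := List.mem_iff_getElem.mp hmem
            have hjx' : ps[j]? = some ((m + k : Nat) : Int) :=
              List.getElem?_eq_some_iff.mpr ⟨hj, hjx⟩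
            have hlt := hbelow j (by rw [hcase, hlen]; exact_mod_cast hj) _ hjx'
            omega
      · rw [if_neg hcase]
        have hrlt : r < (ps.length : Int) := by rw [hlen] at hcase; omega
        cases hq : ps[r.toNat]? with
        | none => exact absurd (List.getElem?_eq_none_iff.mp hq) (by omega)
        | some x =>
        obtain ⟨hrb, hvx⟩ := List.getElem?_eq_some_iff.mp hq
        have hx := habove r.toNat (by omega) _ hq
        have hpg : PySem.List.pyGetD ps r 0 = x :=
          (PySem.List.pyGetD_eq_getElem ps 0 (by omega) (by omega)).trans hvx
        obtain ⟨k', hk', hck', hxeq⟩ := mem_posList.mp (List.mem_of_getElem? hq)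
        have hk'm : m ≤ k' := by omega
        have hlend : (l.drop m).length = l.length - m := List.length_drop
        have hdk' : (l.drop m)[k' - m]? = some c := by
          rw [List.getElem?_drop]
          rw [List.getElem?_eq_getElem (by omega : m + (k' - m) < l.length)]
          congr 1
          have heq : m + (k' - m) = k' := by omega
          simp_rw [heq]
          exact hck'
        cases hfi : (l.drop m).findIdx? (fun d => d == c) with
        | none =>
            exfalso
            rw [List.findIdx?_eq_none_iff] at hfi
            have := hfi c (List.mem_of_getElem? hdk')
            simp at this
        | some k =>
            rw [subseqWhileA_greedy, hfi]
            rw [List.findIdx?_eq_some_iff_getElem] at hfi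
            obtain ⟨hk, hpk, hmin⟩ := hfi
            have hk2 : m + k < l.length := by omega
            have hgc : l[m + k] = c := by
              have h1 : (l.drop m)[k]? = l[m + k]? := List.getElem?_drop
              rw [List.getElem?_eq_getElem hk, List.getElem?_eq_getElem hk2] at h1
              have h2 : (l.drop m)[k] = l[m + k] := by exact_mod_cast Option.some.inj h1
              rw [← h2]; exact beq_iff_eq.mp hpk
            have hkmin : m + k ≤ k' := by
              by_contra hcon
              have hlt2 : k' - m < k := by omega
              have hmn := hmin (k' - m) hlt2
              rw [List.getElem?_eq_some_iff] at hdk'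
              obtain ⟨hb, hbe⟩ := hdk'
              rw [hbe] at hmn
              simp at hmn
            have p0mem : ((m + k : Nat) : Int) ∈ ps :=
              mem_posList.mpr ⟨m + k, hk2, hgc, rfl⟩
            obtain ⟨j, hj, hjx⟩ := List.mem_iff_getElem.mp p0mem
            have hjx' : ps[j]? = some ((m + k : Nat) : Int) :=
              List.getElem?_eq_some_iff.mpr ⟨hj, hjx⟩
            have hjr : r ≤ (j : Int) := by
              by_contra hcon
              have := hbelow j (by omega) _ hjx'
              omega
            have hle1 : x ≤ ((m + k : Nat) : Int) :=
              pairwise_le_getElem? hs' (by omega) hq hjx'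
            have hval : x = ((m + k : Nat) : Int) := by omega
            rw [hpg, hval, ih _ (by omega)]
            have hdrop : ((((m + k : Nat) : Int) + 1).toNat) = m + (k + 1) := by omega
            rw [hdrop, ← List.drop_drop]

-- ===== VERDICT (by name: the statement is the Claim_ definition above) =====
theorem subsequence_spec : Claim_equal_subsequence := by
  intro str1 str2 _
  unfold Spec_subsequence subsequence subsequence_alt
  rw [goB_eq str1.toList str2.toList 0 le_rfl]
  simp only [Int.toNat_zero, List.drop_zero]
  split_ifs with h
  · have hlen := subseqWhileA_length str1.toList str2.toList
    simp only [PySem.Str.len_eq] at h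
    have e1 : str1.toList.length = str1.length := by simp
    have e2 : str2.toList.length = str2.length := by simp
    have hne : subseqWhileA str1.toList str2.toList ≠ [] := by
      intro he; rw [he] at hlen; simp at hlen; omega
    simp [hne]
  · rfl
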